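-- pv_equiv track=rewrite | github.com/kafawi/Daily-Coding-Problem | SOLUTIONS/p034/solution.py | get_nearest_palindrome
-- ===== SOURCE A (Python) =====
-- def get_nearest_palindrome(word: str) -> str:
--     if len(word) < 2:
--         return word
--
--     first = word[0]
--     last = word[-1]
--
--     if first == last:
--         return first + get_nearest_palindrome(word[1:-1]) + last
--     pal_first = first + get_nearest_palindrome(word[1:]) + first
--     pal_last = last + get_nearest_palindrome(word[:-1]) + last
--     # check which is lower
--     return _get_min_word(pal_first, pal_last)
--
-- def _get_min_word(s: str, t: str) -> str:
--     if len(s) > len(t):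
--         return t
--     elif len(s) < len(t):
--         return s
--     else:  # s.length == t.length
--         return min(s, t)
-- ===== SOURCE B (Python) =====
-- def get_nearest_palindrome(word: str) -> str:
--     # Bottom-up DP over substring index pairs (i, j): O(n^3) instead of A's
--     # exponential branching recursion; dp[(i, j)] is the answer for word[i:j].
--     n = len(word)
--     dp = {}
--     for length in range(0, n + 1):
--         for i in range(0, n - length + 1):
--             j = i + length
--             if length < 2:
--                 dp[(i, j)] = word[i:j]
--             elif word[i] == word[j - 1]:
--                 dp[(i, j)] = word[i] + dp[(i + 1, j - 1)] + word[j - 1]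
--             else:
--                 p = word[i] + dp[(i + 1, j)] + word[i]
--                 q = word[j - 1] + dp[(i, j - 1)] + word[j - 1]
--                 dp[(i, j)] = _shorter_then_smaller(p, q)
--     return dp[(0, n)]
--
-- def _shorter_then_smaller(p: str, q: str) -> str:
--     if len(p) != len(q):
--         return p if len(p) < len(q) else q
--     return p if p <= q else q
-- ===== Notes on version B (the rewrite author's own statement) =====
-- stated objective: faster
-- what changed: A's exponential branching recursion over string slices is replaced by a bottom-up dynamic program that fills a dictionary indexed by substring index pairs (i, j) in increasing substring length, so every subproblem is computed once.
import Mathlib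
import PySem

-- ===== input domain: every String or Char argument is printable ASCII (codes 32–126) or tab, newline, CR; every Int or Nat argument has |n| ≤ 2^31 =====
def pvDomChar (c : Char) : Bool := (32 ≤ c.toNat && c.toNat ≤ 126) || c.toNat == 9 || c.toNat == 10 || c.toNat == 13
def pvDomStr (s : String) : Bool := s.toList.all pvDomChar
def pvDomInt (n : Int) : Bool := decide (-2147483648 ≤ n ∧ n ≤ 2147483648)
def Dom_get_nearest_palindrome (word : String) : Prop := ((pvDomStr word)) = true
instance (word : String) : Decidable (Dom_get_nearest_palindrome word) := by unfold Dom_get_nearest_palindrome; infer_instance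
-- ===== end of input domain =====

-- B replaces A's exponential branching recursion by a bottom-up dynamic program over
-- substring index pairs (i, j) (objective: faster, asymptotically).

-- ===== PORT A =====
-- Python string comparison (min(s, t)) is lexicographic by code point: s ≤ t on List Char.
def pvLexLe : List Char → List Char → Bool
  | [], _ => true
  | _ :: _, [] => false
  | a :: s, b :: t => if a < b then true else if b < a then false else pvLexLe s t

-- _get_min_word of A, on the list side
def pvMinWordA (s t : List Char) : List Char :=
  if s.length > t.length then t
  else if s.length < t.length then s
  else if pvLexLe s t then s else t  -- min(s, t)

-- the recursion of A, verbatim on word.toList; word[0] / word[-1] are guarded by len ≥ 2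
def pvAuxA (l : List Char) : List Char :=
  if l.length < 2 then l
  else
    let first := PySem.List.pyGetD l 0 ' '
    let last := PySem.List.pyGetD l (-1) ' '
    if first = last then
      first :: pvAuxA (PySem.List.slice l (some 1) (some (-1))) ++ [last]
    else
      pvMinWordA (first :: pvAuxA (PySem.List.slice l (some 1) none) ++ [first])
                 (last :: pvAuxA (PySem.List.slice l none (some (-1))) ++ [last])
termination_by l.length
decreasing_by
  all_goals (simp [PySem.List.slice, PySem.List.clampIdx]; first | omega | (split_ifs <;> (try simp_all) <;> omega))

def get_nearest_palindrome (word : String) : String :=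
  String.ofList (pvAuxA word.toList)

-- ===== PORT B =====
-- _shorter_then_smaller of Source B
def pvCmpMin (p q : List Char) : List Char :=
  if p.length ≠ q.length then (if p.length < q.length then p else q)
  else if pvLexLe p q then p else q  -- p if p <= q else q

-- one inner-loop iteration of Source B: fill dp[(i, i+len)].  Source B reads dp[(…)] directly;
-- the lookup is ported as getD with default [] — exact here, the key is always present
-- (established by the invariant lemmas below).
def pvStep (w : List Char) (dp : PySem.Dict (Int × Int) (List Char)) (len i : Int) :
    PySem.Dict (Int × Int) (List Char) :=
  let j := i + len
  if len < 2 then dp.insert (i, j) (PySem.List.slice w (some i) (some j))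
  else if PySem.List.pyGetD w i ' ' = PySem.List.pyGetD w (j - 1) ' ' then
    dp.insert (i, j)
      (PySem.List.pyGetD w i ' ' :: dp.getD (i + 1, j - 1) [] ++ [PySem.List.pyGetD w (j - 1) ' '])
  else
    dp.insert (i, j) (pvCmpMin
      (PySem.List.pyGetD w i ' ' :: dp.getD (i + 1, j) [] ++ [PySem.List.pyGetD w i ' '])
      (PySem.List.pyGetD w (j - 1) ' ' :: dp.getD (i, j - 1) [] ++ [PySem.List.pyGetD w (j - 1) ' ']))

-- the two nested loops of Source B, then the final lookup dp[(0, n)]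
def pvAuxB (w : List Char) : List Char :=
  let n : Int := w.length
  let dp := (PySem.List.pyRange 0 (n + 1)).foldl
    (fun dp len => (PySem.List.pyRange 0 (n - len + 1)).foldl (fun dp i => pvStep w dp len i) dp)
    PySem.Dict.empty
  dp.getD (0, n) []

def get_nearest_palindrome_alt (word : String) : String :=
  String.ofList (pvAuxB word.toList)

-- ===== PRECONDITION & SPEC =====
def Spec_get_nearest_palindrome (word : String) (out : String) : Prop := out = get_nearest_palindrome_alt word
instance (word : String) (out : String) : Decidable (Spec_get_nearest_palindrome word out) := by unfold Spec_get_nearest_palindrome; infer_instance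

-- ===== CLAIM (what is proved, stated in full; the proofs are below) =====
def Claim_equal_get_nearest_palindrome : Prop := ∀ (word : String), Dom_get_nearest_palindrome word → Spec_get_nearest_palindrome word (get_nearest_palindrome word)

-- ===== LEMMAS AND PROOFS =====

-- the substring word[i:j] (for 0 ≤ i ≤ j ≤ n), proof-side normal form
def pvSub (w : List Char) (i j : Nat) : List Char := (w.drop i).take (j - i)

theorem pvSub_length (w : List Char) (i j : Nat) (hj : j ≤ w.length) :
    (pvSub w i j).length = j - i := by
  simp [pvSub]; omega

theorem pvSub_zero_len (w : List Char) : pvSub w 0 w.length = w := by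
  simp [pvSub]

theorem pvSub_get_first (w : List Char) (i j : Nat) (hij : i < j) (hj : j ≤ w.length) :
    PySem.List.pyGetD (pvSub w i j) 0 ' ' = PySem.List.pyGetD w (i : Int) ' ' := by
  rw [PySem.List.pyGetD_eq_getElem _ _ (by norm_num) (by rw [pvSub_length w i j hj]; exact_mod_cast by omega),
      PySem.List.pyGetD_eq_getElem _ _ (by positivity) (by exact_mod_cast by omega)]
  simp [pvSub, List.getElem_take, List.getElem_drop]

theorem pvSub_get_last (w : List Char) (i j : Nat) (hij : i < j) (hj : j ≤ w.length) :
    PySem.List.pyGetD (pvSub w i j) (-1) ' ' = PySem.List.pyGetD w ((j : Int) - 1) ' ' := by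
  have hl := pvSub_length w i j hj
  simp [PySem.List.pyGetD, PySem.List.pyGet?, PySem.List.pyIdx?, hl]
  rw [if_pos (by omega : 1 ≤ j - i), if_pos (by omega : 1 ≤ j), if_pos hj]
  have h1 : (pvSub w i j)[j - i - 1]? = w[j - 1]? := by
    rw [List.getElem?_eq_getElem (show j - i - 1 < (pvSub w i j).length by rw [hl]; omega),
        List.getElem?_eq_getElem (show j - 1 < w.length by omega)]
    have hidx : i + (j - i - 1) = j - 1 := by omega
    simp [pvSub, List.getElem_take, List.getElem_drop, hidx]
  simp [h1]

theorem pvSub_slice_mid (w : List Char) (i j : Nat) (hij : 2 ≤ j - i) (hj : j ≤ w.length) :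
    PySem.List.slice (pvSub w i j) (some 1) (some (-1)) = pvSub w (i + 1) (j - 1) := by
  have hl := pvSub_length w i j hj
  have c1 : PySem.List.clampIdx (pvSub w i j).length 1 = 1 := by
    rw [hl]; simp [PySem.List.clampIdx]; omega
  have c2 : PySem.List.clampIdx (pvSub w i j).length (-1) = j - i - 1 := by
    rw [hl]; simp [PySem.List.clampIdx]; split_ifs <;> omega
  have hs : PySem.List.slice (pvSub w i j) (some 1) (some (-1)) =
      List.take (PySem.List.clampIdx (pvSub w i j).length (-1) - PySem.List.clampIdx (pvSub w i j).length 1)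
        (List.drop (PySem.List.clampIdx (pvSub w i j).length 1) (pvSub w i j)) := rfl
  rw [hs, c1, c2]
  simp only [pvSub, List.drop_take, List.drop_drop, List.take_take]
  congr 1
  omega

theorem pvSub_slice_tail (w : List Char) (i j : Nat) (hij : 2 ≤ j - i) (hj : j ≤ w.length) :
    PySem.List.slice (pvSub w i j) (some 1) none = pvSub w (i + 1) j := by
  have hl := pvSub_length w i j hj
  have c1 : PySem.List.clampIdx (pvSub w i j).length 1 = 1 := by
    rw [hl]; simp [PySem.List.clampIdx]; omega
  rw [PySem.List.slice_some_none, c1]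
  simp only [pvSub, List.drop_take, List.drop_drop]
  congr 1

theorem pvSub_slice_init (w : List Char) (i j : Nat) (hij : 2 ≤ j - i) (hj : j ≤ w.length) :
    PySem.List.slice (pvSub w i j) none (some (-1)) = pvSub w i (j - 1) := by
  have hl := pvSub_length w i j hj
  have c2 : PySem.List.clampIdx (pvSub w i j).length (-1) = j - i - 1 := by
    rw [hl]; simp [PySem.List.clampIdx]; split_ifs <;> omega
  have hs : PySem.List.slice (pvSub w i j) none (some (-1)) =
      List.take (PySem.List.clampIdx (pvSub w i j).length (-1) - 0)
        (List.drop 0 (pvSub w i j)) := rfl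
  rw [hs, c2]
  simp only [pvSub, List.drop_take, List.drop_drop, List.take_take, Nat.sub_zero]
  congr 1
  omega

-- one-step unfolding of A's recursion on the substring word[i:j]
theorem pvAuxA_sub (w : List Char) (i j : Nat) (hij : 2 ≤ j - i) (hj : j ≤ w.length) :
    pvAuxA (pvSub w i j) =
      (if PySem.List.pyGetD w (i : Int) ' ' = PySem.List.pyGetD w ((j : Int) - 1) ' ' then
        PySem.List.pyGetD w (i : Int) ' ' :: pvAuxA (pvSub w (i + 1) (j - 1)) ++ [PySem.List.pyGetD w ((j : Int) - 1) ' ']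
      else
        pvMinWordA
          (PySem.List.pyGetD w (i : Int) ' ' :: pvAuxA (pvSub w (i + 1) j) ++ [PySem.List.pyGetD w (i : Int) ' '])
          (PySem.List.pyGetD w ((j : Int) - 1) ' ' :: pvAuxA (pvSub w i (j - 1)) ++ [PySem.List.pyGetD w ((j : Int) - 1) ' '])) := by
  rw [pvAuxA]
  rw [if_neg (by rw [pvSub_length w i j hj]; omega)]
  simp only [pvSub_get_first w i j (by omega) hj, pvSub_get_last w i j (by omega) hj,
    pvSub_slice_mid w i j hij hj, pvSub_slice_tail w i j hij hj, pvSub_slice_init w i j hij hj]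

-- the two min helpers agree
theorem pvCmpMin_eq (p q : List Char) : pvCmpMin p q = pvMinWordA p q := by
  unfold pvCmpMin pvMinWordA
  split_ifs <;> first | rfl | omega

-- dp is correct on every recorded pair
def pvInv (w : List Char) (dp : PySem.Dict (Int × Int) (List Char)) (P : Nat → Nat → Prop) : Prop :=
  ∀ i j : Nat, i ≤ j → j ≤ w.length → P i j →
    dp.get? ((i : Int), (j : Int)) = some (pvAuxA (pvSub w i j))

theorem pvStep_spec (w : List Char) (dp : PySem.Dict (Int × Int) (List Char)) (L i0 : Nat)
    (hle : i0 + L ≤ w.length)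
    (H : pvInv w dp (fun i j => j - i < L)) :
    (pvStep w dp (L : Int) (i0 : Int)).get? ((i0 : Int), ((i0 + L : Nat) : Int)) =
      some (pvAuxA (pvSub w i0 (i0 + L))) := by
  have hcast : ((i0 + L : Nat) : Int) = (i0 : Int) + (L : Int) := by push_cast; ring
  by_cases h2 : L < 2
  · unfold pvStep
    rw [if_pos (by exact_mod_cast h2 : (L : Int) < 2), hcast,
      PySem.Dict.get?_insert_self]
    have ht : ((i0 : Int) + (L : Int)).toNat = i0 + L := by omega
    rw [PySem.List.slice_toNat w (by positivity) (by positivity), ht, Int.toNat_natCast]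
    rw [pvAuxA, if_pos (by rw [pvSub_length w i0 (i0 + L) hle]; omega)]
    simp [pvSub]
  · have hA := pvAuxA_sub w i0 (i0 + L) (by omega) hle
    have e2 : ((i0 + 1 : Nat) : Int) = (i0 : Int) + 1 := by push_cast; ring
    have e3 : ((i0 + L - 1 : Nat) : Int) = (i0 : Int) + (L : Int) - 1 := by omega
    have g1 := H (i0 + 1) (i0 + L - 1) (by omega) (by omega) (by omega)
    have g2 := H (i0 + 1) (i0 + L) (by omega) (by omega) (by omega)
    have g3 := H i0 (i0 + L - 1) (by omega) (by omega) (by omega)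
    simp only [e2, e3, hcast] at g1 g2 g3
    unfold pvStep
    rw [if_neg (by omega : ¬ (L : Int) < 2)]
    simp only [hcast] at hA ⊢
    have ha1 : (i0 + L) - 1 = i0 + L - 1 := rfl
    by_cases hc : PySem.List.pyGetD w (i0 : Int) ' ' = PySem.List.pyGetD w ((i0 : Int) + (L : Int) - 1) ' '
    · rw [if_pos (by simpa using hc), PySem.Dict.get?_insert_self, hA, if_pos hc]
      simp [PySem.Dict.getD, g1]
    · rw [if_neg (by simpa using hc), PySem.Dict.get?_insert_self, hA, if_neg hc]
      simp [PySem.Dict.getD, g2, g3, pvCmpMin_eq]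

theorem pvStep_preserve (w : List Char) (dp : PySem.Dict (Int × Int) (List Char)) (L i0 : Nat)
    (i j : Nat) (hne : ¬ (i = i0 ∧ j = i0 + L)) :
    (pvStep w dp (L : Int) (i0 : Int)).get? ((i : Int), (j : Int)) = dp.get? ((i : Int), (j : Int)) := by
  have hk : ((i : Int), (j : Int)) ≠ ((i0 : Int), (i0 : Int) + (L : Int)) := by
    intro h
    rw [Prod.ext_iff] at h
    simp at h
    omega
  unfold pvStep
  dsimp only
  split_ifs <;> rw [PySem.Dict.get?_insert_of_ne _ _ hk]

theorem pvInner (w : List Char) (L : Nat) (hL : L ≤ w.length) :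
    ∀ (k i0 : Nat) (dp : PySem.Dict (Int × Int) (List Char)),
      (w.length - L + 1) - i0 = k →
      pvInv w dp (fun i j => j - i < L ∨ (j - i = L ∧ i < i0)) →
      pvInv w ((PySem.List.pyRange (i0 : Int) ((w.length : Int) - (L : Int) + 1)).foldl
                 (fun dp i => pvStep w dp (L : Int) i) dp)
        (fun i j => j - i < L ∨ j - i = L) := by
  intro k
  induction k with
  | zero =>
    intro i0 dp hk H
    rw [PySem.List.pyRange_one_eq_nil (by omega)]
    simp only [List.foldl_nil]
    intro i j hij hj hP
    rcases hP with h | h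
    · exact H i j hij hj (Or.inl h)
    · exact H i j hij hj (Or.inr ⟨h, by omega⟩)
  | succ k ih =>
    intro i0 dp hk H
    rw [PySem.List.pyRange_one_cons (by omega : (i0 : Int) < (w.length : Int) - (L : Int) + 1)]
    simp only [List.foldl_cons]
    have Hstep := pvStep_spec w dp L i0 (by omega)
      (fun i j hij hj hP => H i j hij hj (Or.inl hP))
    have hc1 : ((i0 : Int) + 1) = ((i0 + 1 : Nat) : Int) := by push_cast; ring
    rw [hc1]
    apply ih (i0 + 1) _ (by omega)
    intro i j hij hj hP
    rcases hP with h | ⟨h, hi⟩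
    · rw [pvStep_preserve w dp L i0 i j (by omega)]
      exact H i j hij hj (Or.inl h)
    · by_cases he : i = i0
      · subst he
        have hjv : j = i + L := by omega
        subst hjv
        exact Hstep
      · rw [pvStep_preserve w dp L i0 i j (by intro hcon; exact he hcon.1)]
        exact H i j hij hj (Or.inr ⟨h, by omega⟩)

theorem pvOuter (w : List Char) :
    ∀ (k L0 : Nat) (dp : PySem.Dict (Int × Int) (List Char)),
      (w.length + 1) - L0 = k →
      pvInv w dp (fun i j => j - i < L0) →
      pvInv w ((PySem.List.pyRange (L0 : Int) ((w.length : Int) + 1)).foldl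
                 (fun dp len => (PySem.List.pyRange 0 ((w.length : Int) - len + 1)).foldl
                    (fun dp i => pvStep w dp len i) dp) dp)
        (fun i j => j - i ≤ w.length) := by
  intro k
  induction k with
  | zero =>
    intro L0 dp hk H
    rw [PySem.List.pyRange_one_eq_nil (by omega)]
    simp only [List.foldl_nil]
    intro i j hij hj hP
    exact H i j hij hj (by omega)
  | succ k ih =>
    intro L0 dp hk H
    rw [PySem.List.pyRange_one_cons (by omega : (L0 : Int) < (w.length : Int) + 1)]
    simp only [List.foldl_cons]
    have hinner := pvInner w L0 (by omega) (w.length - L0 + 1) 0 dp rfl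
      (fun i j hij hj hP => by
        rcases hP with h | ⟨_, hi⟩
        · exact H i j hij hj h
        · omega)
    simp only [Nat.cast_zero] at hinner
    have hc1 : ((L0 : Int) + 1) = ((L0 + 1 : Nat) : Int) := by push_cast; ring
    rw [hc1]
    apply ih (L0 + 1) _ (by omega)
    intro i j hij hj hP
    exact hinner i j hij hj (by omega)

theorem pvAuxB_eq (w : List Char) : pvAuxB w = pvAuxA w := by
  unfold pvAuxB
  have hout := pvOuter w (w.length + 1) 0 PySem.Dict.empty rfl
    (fun i j _ _ hP => by omega)
  simp only [Nat.cast_zero] at hout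
  have hfin := hout 0 w.length (by omega) (le_refl _) (by omega)
  simp only [Nat.cast_zero] at hfin
  simp only [PySem.Dict.getD, hfin, Option.getD_some, pvSub_zero_len]

-- ===== VERDICT (by name: the statement is the Claim_ definition above) =====
theorem get_nearest_palindrome_spec : Claim_equal_get_nearest_palindrome := by
  intro word _
  unfold Spec_get_nearest_palindrome get_nearest_palindrome get_nearest_palindrome_alt
  rw [pvAuxB_eq]
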